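-- pv_equiv track=rewrite | github.com/Afolab62/Directed-Evolution-Portal | analysis/add_protein_sequences.py | longest_orf_in_circular
-- ===== SOURCE A (Python) =====
-- CODON_TABLE = {
--     "TTT": "F", "TTC": "F", "TTA": "L", "TTG": "L",
--     "CTT": "L", "CTC": "L", "CTA": "L", "CTG": "L",
--     "ATT": "I", "ATC": "I", "ATA": "I", "ATG": "M",
--     "GTT": "V", "GTC": "V", "GTA": "V", "GTG": "V",
--     "TCT": "S", "TCC": "S", "TCA": "S", "TCG": "S",
--     "CCT": "P", "CCC": "P", "CCA": "P", "CCG": "P",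
--     "ACT": "T", "ACC": "T", "ACA": "T", "ACG": "T",
--     "GCT": "A", "GCC": "A", "GCA": "A", "GCG": "A",
--     "TAT": "Y", "TAC": "Y", "TAA": "*", "TAG": "*",
--     "CAT": "H", "CAC": "H", "CAA": "Q", "CAG": "Q",
--     "AAT": "N", "AAC": "N", "AAA": "K", "AAG": "K",
--     "GAT": "D", "GAC": "D", "GAA": "E", "GAG": "E",
--     "TGT": "C", "TGC": "C", "TGA": "*", "TGG": "W",
--     "CGT": "R", "CGC": "R", "CGA": "R", "CGG": "R",
--     "AGT": "S", "AGC": "S", "AGA": "R", "AGG": "R",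
--     "GGT": "G", "GGC": "G", "GGA": "G", "GGG": "G",
-- }
--
-- def translate_dna(seq: str) -> str:
--     aa = []
--     for i in range(0, len(seq) - 2, 3):
--         codon = seq[i:i + 3]
--         aa.append(CODON_TABLE.get(codon, "X"))
--     return "".join(aa)
--
-- def reverse_complement(seq: str) -> str:
--     comp = {"A": "T", "T": "A", "C": "G", "G": "C", "N": "N"}
--     return "".join(comp.get(b, "N") for b in reversed(seq))
--
-- def longest_orf_in_circular(seq: str, min_aa: int = 200) -> str:
--     """
--     Find the longest ORF (M...stop) in a circular DNA sequence by searching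
--     all 6 reading frames of (seq + seq). Returns the protein sequence
--     (stop codon stripped), or empty string if none found above min_aa.
--     """
--     seq = seq.upper()
--     circular = seq + seq           # doubles the sequence to capture wraparound ORFs
--     rc_circular = reverse_complement(seq) + reverse_complement(seq)
--
--     best_protein = ""
--     best_len = min_aa
--
--     for search_seq in (circular, rc_circular):
--         for frame in range(3):
--             protein = translate_dna(search_seq[frame:])
--             i = 0
--             while i < len(protein):
--                 if protein[i] == "M":
--                     j = protein.find("*", i)
--                     end = j if j != -1 else len(protein)
--                     orf_len = end - i
--                     if orf_len > best_len:
--                         best_len = orf_len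
--                         best_protein = protein[i:end]
--                     i = (j + 1) if j != -1 else len(protein)
--                 else:
--                     i += 1
--
--     return best_protein
-- ===== SOURCE B (Python) =====
-- _AA64 = "FFLLSSSSYY**CC*WLLLLPPPPHHQQRRRRIIIMTTTTNNKKSSRRVVVVAAAADDEEGGGG"
--
-- def _base_index(b: str) -> int:
--     if b == "T": return 0
--     if b == "C": return 1
--     if b == "A": return 2
--     if b == "G": return 3
--     return -1
--
-- def _codon_aa(a: str, b: str, c: str) -> str:
--     x, y, z = _base_index(a), _base_index(b), _base_index(c)
--     if x < 0 or y < 0 or z < 0: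
--         return "X"
--     return _AA64[16 * x + 4 * y + z]
--
-- def _translate(dna: str) -> str:
--     it = iter(dna)
--     return "".join(_codon_aa(a, b, c) for a, b, c in zip(it, it, it))
--
-- def _comp(b: str) -> str:
--     if b == "A": return "T"
--     if b == "T": return "A"
--     if b == "C": return "G"
--     if b == "G": return "C"
--     return "N"
--
-- def _revcomp(seq: str) -> str:
--     return "".join(_comp(b) for b in seq)[::-1]
--
-- def longest_orf_in_circular(seq: str, min_aa: int = 200) -> str:
--     """Six-frame circular ORF search via numeric codon indexing into a 64-char
--     amino-acid string (no codon dict), complement-then-reverse, the six frame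
--     proteins staged as a list, and one streaming pass per protein with a
--     running ORF buffer flushed at stop codons."""
--     seq = seq.upper()
--     fwd = seq + seq
--     rev = _revcomp(seq)
--     proteins = [_translate(strand[frame:])
--                 for strand in (fwd, rev + rev)
--                 for frame in (0, 1, 2)]
--
--     best_protein = ""
--     best_len = min_aa
--     for protein in proteins:
--         run = ""
--         for ch in protein:
--             if ch == "*":
--                 if run and len(run) > best_len:
--                     best_len = len(run)
--                     best_protein = run
--                 run = ""
--             elif run:
--                 run += ch
--             elif ch == "M":
--                 run = ch
--         if run and len(run) > best_len:
--             best_len = len(run)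
--             best_protein = run
--     return best_protein
-- ===== Notes on version B (the rewrite author's own statement) =====
-- stated objective: alternative
-- what changed: B drops the codon dictionary in favour of numeric codon indexing (T/C/A/G -> 0..3) into a 64-char amino-acid string with a peel-3-bases translator, builds the reverse complement by complementing then reversing, stages the six frame proteins as a list, and scans each protein in one streaming pass with a running ORF buffer flushed at stop codons instead of A's index-hopping find()-scan.
import Mathlib
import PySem

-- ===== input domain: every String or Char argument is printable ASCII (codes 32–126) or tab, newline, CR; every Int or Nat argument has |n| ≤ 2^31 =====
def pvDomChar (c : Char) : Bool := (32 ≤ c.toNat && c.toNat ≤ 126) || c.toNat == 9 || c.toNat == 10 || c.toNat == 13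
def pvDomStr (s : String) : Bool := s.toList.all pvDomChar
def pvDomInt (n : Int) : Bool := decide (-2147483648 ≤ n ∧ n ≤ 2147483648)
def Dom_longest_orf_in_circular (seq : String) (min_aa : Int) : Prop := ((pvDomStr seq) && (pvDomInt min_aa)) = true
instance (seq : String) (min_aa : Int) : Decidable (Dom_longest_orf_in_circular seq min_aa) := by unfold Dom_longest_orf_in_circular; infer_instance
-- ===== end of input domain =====

-- B replaces A's codon dictionary by numeric codon indexing into a 64-char amino-acid string,
-- A's reversed-complement generator by complement-then-reverse, stages the six frame proteins
-- as a list, and scans each protein in one streaming pass with a running ORF buffer flushed at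
-- stop codons, instead of A's index-hopping find()-scan (objective: alternative, same cost).

-- ===== PORT A =====

-- module helper: CODON_TABLE (dict of 3-char strings to 1-char strings)
def codonPairs : List (List Char × List Char) := [
    (['T','T','T'],['F']),(['T','T','C'],['F']),(['T','T','A'],['L']),(['T','T','G'],['L']),
    (['C','T','T'],['L']),(['C','T','C'],['L']),(['C','T','A'],['L']),(['C','T','G'],['L']),
    (['A','T','T'],['I']),(['A','T','C'],['I']),(['A','T','A'],['I']),(['A','T','G'],['M']),
    (['G','T','T'],['V']),(['G','T','C'],['V']),(['G','T','A'],['V']),(['G','T','G'],['V']),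
    (['T','C','T'],['S']),(['T','C','C'],['S']),(['T','C','A'],['S']),(['T','C','G'],['S']),
    (['C','C','T'],['P']),(['C','C','C'],['P']),(['C','C','A'],['P']),(['C','C','G'],['P']),
    (['A','C','T'],['T']),(['A','C','C'],['T']),(['A','C','A'],['T']),(['A','C','G'],['T']),
    (['G','C','T'],['A']),(['G','C','C'],['A']),(['G','C','A'],['A']),(['G','C','G'],['A']),
    (['T','A','T'],['Y']),(['T','A','C'],['Y']),(['T','A','A'],['*']),(['T','A','G'],['*']),
    (['C','A','T'],['H']),(['C','A','C'],['H']),(['C','A','A'],['Q']),(['C','A','G'],['Q']),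
    (['A','A','T'],['N']),(['A','A','C'],['N']),(['A','A','A'],['K']),(['A','A','G'],['K']),
    (['G','A','T'],['D']),(['G','A','C'],['D']),(['G','A','A'],['E']),(['G','A','G'],['E']),
    (['T','G','T'],['C']),(['T','G','C'],['C']),(['T','G','A'],['*']),(['T','G','G'],['W']),
    (['C','G','T'],['R']),(['C','G','C'],['R']),(['C','G','A'],['R']),(['C','G','G'],['R']),
    (['A','G','T'],['S']),(['A','G','C'],['S']),(['A','G','A'],['R']),(['A','G','G'],['R']),
    (['G','G','T'],['G']),(['G','G','C'],['G']),(['G','G','A'],['G']),(['G','G','G'],['G'])]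

def codonTable : PySem.Dict (List Char) (List Char) := PySem.Dict.ofList codonPairs

-- A's translate_dna (for i in range(0, len(seq)-2, 3): aa.append(CODON_TABLE.get(seq[i:i+3], "X")); "".join(aa))
def translateDnaChars (s : List Char) : List Char :=
  let aa : List (List Char) :=
    (PySem.List.pyRange 0 ((s.length : Int) - 2) 3).foldl
      (fun acc i =>
        let codon := PySem.Chars.slice s (some i) (some (i + 3))
        acc ++ [codonTable.getD codon ['X']]) []
  PySem.Chars.join [] aa

-- A's reverse_complement ("".join(comp.get(b, "N") for b in reversed(seq)))
def reverseComplementChars (s : List Char) : List Char :=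
  let comp : PySem.Dict Char Char :=
    PySem.Dict.ofList [('A', 'T'), ('T', 'A'), ('C', 'G'), ('G', 'C'), ('N', 'N')]
  PySem.Chars.join [] (s.reverse.map (fun b => [comp.getD b 'N']))

-- A's inner while-loop over the protein (index i, protein.find("*", i), slice protein[i:end]);
-- fuel = remaining iterations (i strictly increases, so protein.length - i suffices; fuel only
-- makes the same loop total)
def scanALoop (protein : List Char) : Nat → Nat → (List Char × Int) → (List Char × Int)
  | 0, _, st => st
  | fuel + 1, i, st =>
    if h : i < protein.length then
      if protein[i] = 'M' then
        let j : Int := PySem.Chars.findFrom protein ['*'] (i : Int) none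
        let endPos : Int := if j ≠ -1 then j else (protein.length : Int)
        let orfLen : Int := endPos - (i : Int)
        let st' := if orfLen > st.2 then (PySem.Chars.slice protein (some (i : Int)) (some endPos), orfLen) else st
        let i' : Int := if j ≠ -1 then j + 1 else (protein.length : Int)
        scanALoop protein fuel i'.toNat st'
      else
        scanALoop protein fuel (i + 1) st
    else st

def longest_orf_in_circular (seq : String) (min_aa : Int) : String :=
  let s := PySem.Chars.upper seq.toList
  let circular := s ++ s
  let rc_circular := reverseComplementChars s ++ reverseComplementChars s
  let final :=
    [circular, rc_circular].foldl
      (fun st search_seq =>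
        (PySem.List.pyRange 0 3 1).foldl
          (fun st frame =>
            let protein := translateDnaChars (PySem.Chars.slice search_seq (some frame) none)
            scanALoop protein protein.length 0 st)
          st)
      ([], min_aa)
  String.ofList final.1

-- ===== PORT B =====

-- B's 64-char amino-acid table _AA64, indexed by 16*x + 4*y + z over base codes T=0 C=1 A=2 G=3
def aa64 : List Char :=
  ['F','F','L','L','S','S','S','S','Y','Y','*','*','C','C','*','W',
   'L','L','L','L','P','P','P','P','H','H','Q','Q','R','R','R','R',
   'I','I','I','M','T','T','T','T','N','N','K','K','S','S','R','R',
   'V','V','V','V','A','A','A','A','D','D','E','E','G','G','G','G']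

-- B's _base_index
def baseIndex (b : Char) : Int :=
  if b = 'T' then 0 else if b = 'C' then 1 else if b = 'A' then 2 else if b = 'G' then 3 else -1

-- B's _codon_aa; the _AA64[...] indexing is in range whenever it is reached (0 ≤ x,y,z ≤ 3),
-- so getD with the unused default is exact there
def codonAAB (a b c : Char) : Char :=
  let x := baseIndex a
  let y := baseIndex b
  let z := baseIndex c
  if x < 0 ∨ y < 0 ∨ z < 0 then 'X'
  else aa64.getD (16 * x + 4 * y + z).toNat 'X'

-- B's _translate: peel one codon per step (zip(it, it, it) consumes three chars at a time)
def translateB : List Char → List Char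
  | a :: b :: c :: rest => codonAAB a b c :: translateB rest
  | _ => []

-- B's _comp
def compB (b : Char) : Char :=
  if b = 'A' then 'T' else if b = 'T' then 'A' else if b = 'C' then 'G' else if b = 'G' then 'C' else 'N'

-- B's _revcomp: complement each base, then reverse ([::-1])
def revcompB (s : List Char) : List Char := (s.map compB).reverse

-- B's inner streaming pass: one fold over the protein growing a running ORF buffer,
-- flushed at '*' and once more at the end of the frame
def scanB (protein : List Char) (st0 : List Char × Int) : List Char × Int :=
  let r :=
    protein.foldl
      (fun (acc : (List Char × Int) × List Char) ch =>
        let st := acc.1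
        let run := acc.2
        if ch = '*' then
          (if run ≠ [] ∧ (run.length : Int) > st.2 then (run, (run.length : Int)) else st, [])
        else if run ≠ [] then (st, run ++ [ch])
        else if ch = 'M' then (st, [ch])
        else acc)
      (st0, [])
  if r.2 ≠ [] ∧ (r.2.length : Int) > r.1.2 then (r.2, (r.2.length : Int)) else r.1

def longest_orf_in_circular_alt (seq : String) (min_aa : Int) : String :=
  let s := PySem.Chars.upper seq.toList
  let fwd := s ++ s
  let rev := revcompB s
  let proteins := [fwd, rev ++ rev].flatMap (fun strand => [0, 1, 2].map (fun f => translateB (strand.drop f)))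
  let final := proteins.foldl (fun st protein => scanB protein st) ([], min_aa)
  String.ofList final.1

-- ===== PRECONDITION & SPEC =====
def Spec_longest_orf_in_circular (seq : String) (min_aa : Int) (out : String) : Prop := out = longest_orf_in_circular_alt seq min_aa
instance (seq : String) (min_aa : Int) (out : String) : Decidable (Spec_longest_orf_in_circular seq min_aa out) := by unfold Spec_longest_orf_in_circular; infer_instance

-- ===== CLAIM (what is proved, stated in full; the proofs are below) =====
def Claim_equal_longest_orf_in_circular : Prop := ∀ (seq : String) (min_aa : Int), Dom_longest_orf_in_circular seq min_aa → Spec_longest_orf_in_circular seq min_aa (longest_orf_in_circular seq min_aa)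

-- ===== LEMMAS AND PROOFS =====

lemma char_cases (x : Char) : x = 'T' ∨ x = 'C' ∨ x = 'A' ∨ x = 'G' ∨ (x ≠ 'T' ∧ x ≠ 'C' ∧ x ≠ 'A' ∧ x ≠ 'G') := by tauto

-- The codon dictionary lookup IS the numeric 64-table lookup
set_option maxRecDepth 8192 in
lemma getD_codon (a b c : Char) : codonTable.getD [a, b, c] ['X'] = [codonAAB a b c] := by
  have hitems : codonTable.items = codonPairs := by rfl
  rcases char_cases a with rfl | rfl | rfl | rfl | ha
  · rcases char_cases b with rfl | rfl | rfl | rfl | hb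
    · rcases char_cases c with rfl | rfl | rfl | rfl | hcc
      · decide
      · decide
      · decide
      · decide
      · have hmiss : codonTable.contains ['T', 'T', c] = false := by
          simp [PySem.Dict.contains, hitems, codonPairs, hcc.1, hcc.2.1, hcc.2.2.1, hcc.2.2.2, Ne.symm hcc.1, Ne.symm hcc.2.1, Ne.symm hcc.2.2.1, Ne.symm hcc.2.2.2]
        rw [PySem.Dict.getD_of_not_contains _ _ hmiss]
        simp [codonAAB, baseIndex, hcc.1, hcc.2.1, hcc.2.2.1, hcc.2.2.2, Ne.symm hcc.1, Ne.symm hcc.2.1, Ne.symm hcc.2.2.1, Ne.symm hcc.2.2.2]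
    · rcases char_cases c with rfl | rfl | rfl | rfl | hcc
      · decide
      · decide
      · decide
      · decide
      · have hmiss : codonTable.contains ['T', 'C', c] = false := by
          simp [PySem.Dict.contains, hitems, codonPairs, hcc.1, hcc.2.1, hcc.2.2.1, hcc.2.2.2, Ne.symm hcc.1, Ne.symm hcc.2.1, Ne.symm hcc.2.2.1, Ne.symm hcc.2.2.2]
        rw [PySem.Dict.getD_of_not_contains _ _ hmiss]
        simp [codonAAB, baseIndex, hcc.1, hcc.2.1, hcc.2.2.1, hcc.2.2.2, Ne.symm hcc.1, Ne.symm hcc.2.1, Ne.symm hcc.2.2.1, Ne.symm hcc.2.2.2]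
    · rcases char_cases c with rfl | rfl | rfl | rfl | hcc
      · decide
      · decide
      · decide
      · decide
      · have hmiss : codonTable.contains ['T', 'A', c] = false := by
          simp [PySem.Dict.contains, hitems, codonPairs, hcc.1, hcc.2.1, hcc.2.2.1, hcc.2.2.2, Ne.symm hcc.1, Ne.symm hcc.2.1, Ne.symm hcc.2.2.1, Ne.symm hcc.2.2.2]
        rw [PySem.Dict.getD_of_not_contains _ _ hmiss]
        simp [codonAAB, baseIndex, hcc.1, hcc.2.1, hcc.2.2.1, hcc.2.2.2, Ne.symm hcc.1, Ne.symm hcc.2.1, Ne.symm hcc.2.2.1, Ne.symm hcc.2.2.2]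
    · rcases char_cases c with rfl | rfl | rfl | rfl | hcc
      · decide
      · decide
      · decide
      · decide
      · have hmiss : codonTable.contains ['T', 'G', c] = false := by
          simp [PySem.Dict.contains, hitems, codonPairs, hcc.1, hcc.2.1, hcc.2.2.1, hcc.2.2.2, Ne.symm hcc.1, Ne.symm hcc.2.1, Ne.symm hcc.2.2.1, Ne.symm hcc.2.2.2]
        rw [PySem.Dict.getD_of_not_contains _ _ hmiss]
        simp [codonAAB, baseIndex, hcc.1, hcc.2.1, hcc.2.2.1, hcc.2.2.2, Ne.symm hcc.1, Ne.symm hcc.2.1, Ne.symm hcc.2.2.1, Ne.symm hcc.2.2.2]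
    · have hmiss : codonTable.contains ['T', b, c] = false := by
        simp [PySem.Dict.contains, hitems, codonPairs, hb.1, hb.2.1, hb.2.2.1, hb.2.2.2, Ne.symm hb.1, Ne.symm hb.2.1, Ne.symm hb.2.2.1, Ne.symm hb.2.2.2]
      rw [PySem.Dict.getD_of_not_contains _ _ hmiss]
      simp [codonAAB, baseIndex, hb.1, hb.2.1, hb.2.2.1, hb.2.2.2, Ne.symm hb.1, Ne.symm hb.2.1, Ne.symm hb.2.2.1, Ne.symm hb.2.2.2]
  · rcases char_cases b with rfl | rfl | rfl | rfl | hb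
    · rcases char_cases c with rfl | rfl | rfl | rfl | hcc
      · decide
      · decide
      · decide
      · decide
      · have hmiss : codonTable.contains ['C', 'T', c] = false := by
          simp [PySem.Dict.contains, hitems, codonPairs, hcc.1, hcc.2.1, hcc.2.2.1, hcc.2.2.2, Ne.symm hcc.1, Ne.symm hcc.2.1, Ne.symm hcc.2.2.1, Ne.symm hcc.2.2.2]
        rw [PySem.Dict.getD_of_not_contains _ _ hmiss]
        simp [codonAAB, baseIndex, hcc.1, hcc.2.1, hcc.2.2.1, hcc.2.2.2, Ne.symm hcc.1, Ne.symm hcc.2.1, Ne.symm hcc.2.2.1, Ne.symm hcc.2.2.2]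
    · rcases char_cases c with rfl | rfl | rfl | rfl | hcc
      · decide
      · decide
      · decide
      · decide
      · have hmiss : codonTable.contains ['C', 'C', c] = false := by
          simp [PySem.Dict.contains, hitems, codonPairs, hcc.1, hcc.2.1, hcc.2.2.1, hcc.2.2.2, Ne.symm hcc.1, Ne.symm hcc.2.1, Ne.symm hcc.2.2.1, Ne.symm hcc.2.2.2]
        rw [PySem.Dict.getD_of_not_contains _ _ hmiss]
        simp [codonAAB, baseIndex, hcc.1, hcc.2.1, hcc.2.2.1, hcc.2.2.2, Ne.symm hcc.1, Ne.symm hcc.2.1, Ne.symm hcc.2.2.1, Ne.symm hcc.2.2.2]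
    · rcases char_cases c with rfl | rfl | rfl | rfl | hcc
      · decide
      · decide
      · decide
      · decide
      · have hmiss : codonTable.contains ['C', 'A', c] = false := by
          simp [PySem.Dict.contains, hitems, codonPairs, hcc.1, hcc.2.1, hcc.2.2.1, hcc.2.2.2, Ne.symm hcc.1, Ne.symm hcc.2.1, Ne.symm hcc.2.2.1, Ne.symm hcc.2.2.2]
        rw [PySem.Dict.getD_of_not_contains _ _ hmiss]
        simp [codonAAB, baseIndex, hcc.1, hcc.2.1, hcc.2.2.1, hcc.2.2.2, Ne.symm hcc.1, Ne.symm hcc.2.1, Ne.symm hcc.2.2.1, Ne.symm hcc.2.2.2]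
    · rcases char_cases c with rfl | rfl | rfl | rfl | hcc
      · decide
      · decide
      · decide
      · decide
      · have hmiss : codonTable.contains ['C', 'G', c] = false := by
          simp [PySem.Dict.contains, hitems, codonPairs, hcc.1, hcc.2.1, hcc.2.2.1, hcc.2.2.2, Ne.symm hcc.1, Ne.symm hcc.2.1, Ne.symm hcc.2.2.1, Ne.symm hcc.2.2.2]
        rw [PySem.Dict.getD_of_not_contains _ _ hmiss]
        simp [codonAAB, baseIndex, hcc.1, hcc.2.1, hcc.2.2.1, hcc.2.2.2, Ne.symm hcc.1, Ne.symm hcc.2.1, Ne.symm hcc.2.2.1, Ne.symm hcc.2.2.2]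
    · have hmiss : codonTable.contains ['C', b, c] = false := by
        simp [PySem.Dict.contains, hitems, codonPairs, hb.1, hb.2.1, hb.2.2.1, hb.2.2.2, Ne.symm hb.1, Ne.symm hb.2.1, Ne.symm hb.2.2.1, Ne.symm hb.2.2.2]
      rw [PySem.Dict.getD_of_not_contains _ _ hmiss]
      simp [codonAAB, baseIndex, hb.1, hb.2.1, hb.2.2.1, hb.2.2.2, Ne.symm hb.1, Ne.symm hb.2.1, Ne.symm hb.2.2.1, Ne.symm hb.2.2.2]
  · rcases char_cases b with rfl | rfl | rfl | rfl | hb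
    · rcases char_cases c with rfl | rfl | rfl | rfl | hcc
      · decide
      · decide
      · decide
      · decide
      · have hmiss : codonTable.contains ['A', 'T', c] = false := by
          simp [PySem.Dict.contains, hitems, codonPairs, hcc.1, hcc.2.1, hcc.2.2.1, hcc.2.2.2, Ne.symm hcc.1, Ne.symm hcc.2.1, Ne.symm hcc.2.2.1, Ne.symm hcc.2.2.2]
        rw [PySem.Dict.getD_of_not_contains _ _ hmiss]
        simp [codonAAB, baseIndex, hcc.1, hcc.2.1, hcc.2.2.1, hcc.2.2.2, Ne.symm hcc.1, Ne.symm hcc.2.1, Ne.symm hcc.2.2.1, Ne.symm hcc.2.2.2]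
    · rcases char_cases c with rfl | rfl | rfl | rfl | hcc
      · decide
      · decide
      · decide
      · decide
      · have hmiss : codonTable.contains ['A', 'C', c] = false := by
          simp [PySem.Dict.contains, hitems, codonPairs, hcc.1, hcc.2.1, hcc.2.2.1, hcc.2.2.2, Ne.symm hcc.1, Ne.symm hcc.2.1, Ne.symm hcc.2.2.1, Ne.symm hcc.2.2.2]
        rw [PySem.Dict.getD_of_not_contains _ _ hmiss]
        simp [codonAAB, baseIndex, hcc.1, hcc.2.1, hcc.2.2.1, hcc.2.2.2, Ne.symm hcc.1, Ne.symm hcc.2.1, Ne.symm hcc.2.2.1, Ne.symm hcc.2.2.2]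
    · rcases char_cases c with rfl | rfl | rfl | rfl | hcc
      · decide
      · decide
      · decide
      · decide
      · have hmiss : codonTable.contains ['A', 'A', c] = false := by
          simp [PySem.Dict.contains, hitems, codonPairs, hcc.1, hcc.2.1, hcc.2.2.1, hcc.2.2.2, Ne.symm hcc.1, Ne.symm hcc.2.1, Ne.symm hcc.2.2.1, Ne.symm hcc.2.2.2]
        rw [PySem.Dict.getD_of_not_contains _ _ hmiss]
        simp [codonAAB, baseIndex, hcc.1, hcc.2.1, hcc.2.2.1, hcc.2.2.2, Ne.symm hcc.1, Ne.symm hcc.2.1, Ne.symm hcc.2.2.1, Ne.symm hcc.2.2.2]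
    · rcases char_cases c with rfl | rfl | rfl | rfl | hcc
      · decide
      · decide
      · decide
      · decide
      · have hmiss : codonTable.contains ['A', 'G', c] = false := by
          simp [PySem.Dict.contains, hitems, codonPairs, hcc.1, hcc.2.1, hcc.2.2.1, hcc.2.2.2, Ne.symm hcc.1, Ne.symm hcc.2.1, Ne.symm hcc.2.2.1, Ne.symm hcc.2.2.2]
        rw [PySem.Dict.getD_of_not_contains _ _ hmiss]
        simp [codonAAB, baseIndex, hcc.1, hcc.2.1, hcc.2.2.1, hcc.2.2.2, Ne.symm hcc.1, Ne.symm hcc.2.1, Ne.symm hcc.2.2.1, Ne.symm hcc.2.2.2]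
    · have hmiss : codonTable.contains ['A', b, c] = false := by
        simp [PySem.Dict.contains, hitems, codonPairs, hb.1, hb.2.1, hb.2.2.1, hb.2.2.2, Ne.symm hb.1, Ne.symm hb.2.1, Ne.symm hb.2.2.1, Ne.symm hb.2.2.2]
      rw [PySem.Dict.getD_of_not_contains _ _ hmiss]
      simp [codonAAB, baseIndex, hb.1, hb.2.1, hb.2.2.1, hb.2.2.2, Ne.symm hb.1, Ne.symm hb.2.1, Ne.symm hb.2.2.1, Ne.symm hb.2.2.2]
  · rcases char_cases b with rfl | rfl | rfl | rfl | hb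
    · rcases char_cases c with rfl | rfl | rfl | rfl | hcc
      · decide
      · decide
      · decide
      · decide
      · have hmiss : codonTable.contains ['G', 'T', c] = false := by
          simp [PySem.Dict.contains, hitems, codonPairs, hcc.1, hcc.2.1, hcc.2.2.1, hcc.2.2.2, Ne.symm hcc.1, Ne.symm hcc.2.1, Ne.symm hcc.2.2.1, Ne.symm hcc.2.2.2]
        rw [PySem.Dict.getD_of_not_contains _ _ hmiss]
        simp [codonAAB, baseIndex, hcc.1, hcc.2.1, hcc.2.2.1, hcc.2.2.2, Ne.symm hcc.1, Ne.symm hcc.2.1, Ne.symm hcc.2.2.1, Ne.symm hcc.2.2.2]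
    · rcases char_cases c with rfl | rfl | rfl | rfl | hcc
      · decide
      · decide
      · decide
      · decide
      · have hmiss : codonTable.contains ['G', 'C', c] = false := by
          simp [PySem.Dict.contains, hitems, codonPairs, hcc.1, hcc.2.1, hcc.2.2.1, hcc.2.2.2, Ne.symm hcc.1, Ne.symm hcc.2.1, Ne.symm hcc.2.2.1, Ne.symm hcc.2.2.2]
        rw [PySem.Dict.getD_of_not_contains _ _ hmiss]
        simp [codonAAB, baseIndex, hcc.1, hcc.2.1, hcc.2.2.1, hcc.2.2.2, Ne.symm hcc.1, Ne.symm hcc.2.1, Ne.symm hcc.2.2.1, Ne.symm hcc.2.2.2]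
    · rcases char_cases c with rfl | rfl | rfl | rfl | hcc
      · decide
      · decide
      · decide
      · decide
      · have hmiss : codonTable.contains ['G', 'A', c] = false := by
          simp [PySem.Dict.contains, hitems, codonPairs, hcc.1, hcc.2.1, hcc.2.2.1, hcc.2.2.2, Ne.symm hcc.1, Ne.symm hcc.2.1, Ne.symm hcc.2.2.1, Ne.symm hcc.2.2.2]
        rw [PySem.Dict.getD_of_not_contains _ _ hmiss]
        simp [codonAAB, baseIndex, hcc.1, hcc.2.1, hcc.2.2.1, hcc.2.2.2, Ne.symm hcc.1, Ne.symm hcc.2.1, Ne.symm hcc.2.2.1, Ne.symm hcc.2.2.2]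
    · rcases char_cases c with rfl | rfl | rfl | rfl | hcc
      · decide
      · decide
      · decide
      · decide
      · have hmiss : codonTable.contains ['G', 'G', c] = false := by
          simp [PySem.Dict.contains, hitems, codonPairs, hcc.1, hcc.2.1, hcc.2.2.1, hcc.2.2.2, Ne.symm hcc.1, Ne.symm hcc.2.1, Ne.symm hcc.2.2.1, Ne.symm hcc.2.2.2]
        rw [PySem.Dict.getD_of_not_contains _ _ hmiss]
        simp [codonAAB, baseIndex, hcc.1, hcc.2.1, hcc.2.2.1, hcc.2.2.2, Ne.symm hcc.1, Ne.symm hcc.2.1, Ne.symm hcc.2.2.1, Ne.symm hcc.2.2.2]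
    · have hmiss : codonTable.contains ['G', b, c] = false := by
        simp [PySem.Dict.contains, hitems, codonPairs, hb.1, hb.2.1, hb.2.2.1, hb.2.2.2, Ne.symm hb.1, Ne.symm hb.2.1, Ne.symm hb.2.2.1, Ne.symm hb.2.2.2]
      rw [PySem.Dict.getD_of_not_contains _ _ hmiss]
      simp [codonAAB, baseIndex, hb.1, hb.2.1, hb.2.2.1, hb.2.2.2, Ne.symm hb.1, Ne.symm hb.2.1, Ne.symm hb.2.2.1, Ne.symm hb.2.2.2]
  · have hmiss : codonTable.contains [a, b, c] = false := by
      simp [PySem.Dict.contains, hitems, codonPairs, ha.1, ha.2.1, ha.2.2.1, ha.2.2.2, Ne.symm ha.1, Ne.symm ha.2.1, Ne.symm ha.2.2.1, Ne.symm ha.2.2.2]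
    rw [PySem.Dict.getD_of_not_contains _ _ hmiss]
    simp [codonAAB, baseIndex, ha.1, ha.2.1, ha.2.2.1, ha.2.2.2, Ne.symm ha.1, Ne.symm ha.2.1, Ne.symm ha.2.2.1, Ne.symm ha.2.2.2]

lemma join_flatten (xs : List (List Char)) : PySem.Chars.join [] xs = xs.flatten := by
  induction xs with
  | nil => rfl
  | cons x xs ih =>
    simp only [PySem.Chars.join, List.intercalate] at *
    cases xs <;> simp_all

-- A's translate, as a flatten of per-codon lookups
set_option maxRecDepth 4096 in
lemma translateDna_map (l : List Char) :
    translateDnaChars l =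
      ((List.range (l.length / 3)).map (fun k => codonTable.getD ((l.drop (3 * k)).take 3) ['X'])).flatten := by
  unfold translateDnaChars
  rw [PySem.List.foldl_append_singleton_eq_map
        (fun i => codonTable.getD (PySem.Chars.slice l (some i) (some (i + 3))) ['X'])]
  rw [join_flatten, List.nil_append,
    PySem.List.pyRange_of_pos 0 ((l.length : Int) - 2) (by norm_num), List.map_map]
  have hcnt : (if (0:Int) < (l.length:Int) - 2 then (((l.length:Int) - 2 - 0 + 3 - 1)/3).toNat else 0) = l.length / 3 := by
    split_ifs with h <;> omega
  rw [hcnt]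
  congr 1
  apply List.map_congr_left
  intro k hk
  simp only [Function.comp_apply, PySem.Chars.slice_eq_listSlice]
  have h1 : (0:Int) + 3 * (k:Int) = ((3 * k : Nat) : Int) := by push_cast; ring
  rw [h1, show ((3:Int)) = ((3:Nat):Int) from rfl, PySem.List.slice_natCast_add]

-- A's per-index translate loop equals B's peel-3 translate, by induction on length
lemma translateA_len (n : Nat) :
    ∀ l : List Char, l.length ≤ n → translateDnaChars l = translateB l := by
  induction n with
  | zero =>
    intro l h
    have : l = [] := List.eq_nil_of_length_eq_zero (by omega)
    subst this
    rw [translateDna_map]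
    rfl
  | succ n ih =>
    intro l h
    match l with
    | [] => rw [translateDna_map]; rfl
    | [a] => rw [translateDna_map]; simp [translateB]
    | [a, b] => rw [translateDna_map]; simp [translateB]
    | a :: b :: c :: rest =>
      rw [translateDna_map]
      have hlen : (a :: b :: c :: rest).length / 3 = rest.length / 3 + 1 := by
        simp only [List.length_cons]; omega
      rw [hlen, List.range_succ_eq_map, List.map_cons, List.flatten_cons, List.map_map]
      have hhead : ((a :: b :: c :: rest).drop (3 * 0)).take 3 = [a, b, c] := by simp
      have htail : (List.range (rest.length / 3)).map
            ((fun k => codonTable.getD (((a :: b :: c :: rest).drop (3 * k)).take 3) ['X']) ∘ Nat.succ)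
          = (List.range (rest.length / 3)).map
            (fun k => codonTable.getD ((rest.drop (3 * k)).take 3) ['X']) := by
        apply List.map_congr_left
        intro k hk
        simp only [Function.comp_apply]
        have : 3 * Nat.succ k = 3 * k + 1 + 1 + 1 := by omega
        rw [this]
        simp [List.drop_succ_cons]
      rw [hhead, htail, getD_codon, ← translateDna_map,
        ih rest (by simp only [List.length_cons] at h; omega)]
      rfl

lemma translateA_eq (l : List Char) : translateDnaChars l = translateB l :=
  translateA_len l.length l le_rfl

lemma compD_eq (b : Char) :
    (PySem.Dict.ofList [('A', 'T'), ('T', 'A'), ('C', 'G'), ('G', 'C'), ('N', 'N')]).getD b 'N' = compB b := by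
  rcases (by tauto : b = 'A' ∨ b = 'T' ∨ b = 'C' ∨ b = 'G' ∨ b = 'N' ∨
      (b ≠ 'A' ∧ b ≠ 'T' ∧ b ≠ 'C' ∧ b ≠ 'G' ∧ b ≠ 'N')) with rfl | rfl | rfl | rfl | rfl | hb
  · decide
  · decide
  · decide
  · decide
  · decide
  · have hmiss : (PySem.Dict.ofList
        [('A', 'T'), ('T', 'A'), ('C', 'G'), ('G', 'C'), ('N', 'N')]).contains b = false := by
      simp [PySem.Dict.contains, show (PySem.Dict.ofList [('A', 'T'), ('T', 'A'), ('C', 'G'), ('G', 'C'), ('N', 'N')]).items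
          = [('A', 'T'), ('T', 'A'), ('C', 'G'), ('G', 'C'), ('N', 'N')] from rfl,
        Ne.symm hb.1, Ne.symm hb.2.1, Ne.symm hb.2.2.1, Ne.symm hb.2.2.2.1, Ne.symm hb.2.2.2.2]
    rw [PySem.Dict.getD_of_not_contains _ _ hmiss]
    simp [compB, hb.1, hb.2.1, hb.2.2.1, hb.2.2.2.1]

-- A's reverse-complement equals B's complement-then-reverse
lemma revcomp_eq (s : List Char) : reverseComplementChars s = revcompB s := by
  unfold reverseComplementChars revcompB
  have h1 : ∀ t : List Char, PySem.Chars.join [] (t.map (fun b =>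
      [(PySem.Dict.ofList [('A', 'T'), ('T', 'A'), ('C', 'G'), ('G', 'C'), ('N', 'N')]).getD b 'N'])) = t.map compB := by
    intro t
    rw [join_flatten]
    induction t with
    | nil => rfl
    | cons x xs ih => simp_all [compD_eq]
  rw [h1 s.reverse, List.map_reverse]

-- common specification of one frame's scan: structural recursion over the segments
def flushS (st : List Char × Int) (orf : List Char) : List Char × Int :=
  if (orf.length : Int) > st.2 then (orf, (orf.length : Int)) else st

def scanS : List Char → (List Char × Int) → (List Char × Int)
  | [], st => st
  | c :: cs, st =>
    if c = 'M' then
      scanS ((cs.dropWhile (fun x => x ≠ '*')).drop 1)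
        (flushS st (c :: cs.takeWhile (fun x => x ≠ '*')))
    else scanS cs st
termination_by l _ => l.length
decreasing_by
  · have h1 := List.length_dropWhile_le (fun x => x ≠ '*') cs
    simp only [List.length_drop, List.length_cons]
    omega
  · simp

lemma dropWhile_eq_drop_len_takeWhile (p : Char → Bool) (s : List Char) :
    s.dropWhile p = s.drop (s.takeWhile p).length := by
  induction s with
  | nil => rfl
  | cons c cs ih => by_cases h : p c <;> simp [h, ih]

lemma take_len_takeWhile (p : Char → Bool) (s : List Char) :
    s.take (s.takeWhile p).length = s.takeWhile p :=
  (List.prefix_iff_eq_take.mp (List.takeWhile_prefix p)).symm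

lemma find_single_eq_neg_one (c : Char) (s : List Char) (h : c ∉ s) :
    PySem.Chars.find s [c] = -1 := by
  rw [PySem.Chars.find_eq_neg_one_iff, List.singleton_infix_iff]
  exact h

lemma dropWhile_ne_cons (c : Char) (s : List Char) (h : c ∈ s) :
    ∃ t, s.dropWhile (fun x => x ≠ c) = c :: t := by
  induction s with
  | nil => cases h
  | cons a as ih =>
    by_cases hac : a = c
    · subst hac; exact ⟨as, by simp⟩
    · have hm : c ∈ as := by
        rcases List.mem_cons.mp h with h' | h'
        · exact absurd h'.symm hac
        · exact h'
      obtain ⟨t, ht⟩ := ih hm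
      refine ⟨t, ?_⟩
      rw [List.dropWhile_cons, if_pos (by simp [hac]), ht]

lemma find_single_eq_of_mem (c : Char) (s : List Char) (h : c ∈ s) :
    PySem.Chars.find s [c] = ((s.takeWhile (fun x => x ≠ c)).length : Int) := by
  have hnn : 0 ≤ PySem.Chars.find s [c] := by
    rw [PySem.Chars.find_nonneg_iff, List.singleton_infix_iff]; exact h
  obtain ⟨hpre, hmin⟩ := PySem.Chars.find_spec (s := s) (sub := [c]) hnn
  set n := (PySem.Chars.find s [c]).toNat with hn
  set idx := (s.takeWhile (fun x => x ≠ c)).length with hidxdef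
  have hdw : s.dropWhile (fun x => x ≠ c) = s.drop idx :=
    dropWhile_eq_drop_len_takeWhile _ s
  have hat : [c] <+: s.drop idx := by
    obtain ⟨t, ht⟩ := dropWhile_ne_cons c s h
    rw [← hdw, ht]
    exact ⟨t, rfl⟩
  have h1 : n ≤ idx := by
    by_contra hlt
    exact hmin idx (by omega) hat
  have hidxle : idx ≤ s.length :=
    (List.takeWhile_prefix (fun x => x ≠ c)).length_le
  have h2 : ¬ n < idx := by
    intro hlt
    obtain ⟨t, ht⟩ := hpre
    have hns : n < s.length := by omega
    have hdropn : s.drop n = s[n] :: s.drop (n + 1) := List.drop_eq_getElem_cons hns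
    rw [hdropn] at ht
    have hc : s[n] = c := (List.cons_eq_cons.mp ht).1.symm
    have htl : n < (s.takeWhile (fun x => x ≠ c)).length := hlt
    have hg : (s.takeWhile (fun x => x ≠ c))[n] = s[n] :=
      List.IsPrefix.getElem (List.takeWhile_prefix _) htl
    have hp := List.mem_takeWhile_imp (List.getElem_mem htl)
    rw [hg, hc] at hp
    simp at hp
  have : n = idx := by omega
  omega

-- one-step unfoldings of scanS
lemma scanS_nil (st : List Char × Int) : scanS [] st = st := by rw [scanS]

lemma scanS_cons_M (cs : List Char) (st : List Char × Int) :
    scanS ('M' :: cs) st =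
      scanS ((cs.dropWhile (fun x => x ≠ '*')).drop 1)
        (flushS st ('M' :: cs.takeWhile (fun x => x ≠ '*'))) := by
  rw [scanS]
  simp

lemma scanS_cons_ne (c : Char) (cs : List Char) (st : List Char × Int) (h : c ≠ 'M') :
    scanS (c :: cs) st = scanS cs st := by
  rw [scanS, if_neg h]

-- A's while-loop computes scanS of the remaining protein
lemma scanALoop_eq_scanS (fuel : Nat) :
    ∀ (p : List Char) (i : Nat) (st : List Char × Int), p.length - i ≤ fuel →
      scanALoop p fuel i st = scanS (p.drop i) st := by
  induction fuel with
  | zero =>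
    intro p i st h
    have hd : p.drop i = [] := List.drop_eq_nil_iff.mpr (by omega)
    simp [scanALoop, hd, scanS]
  | succ fuel ih =>
    intro p i st h
    by_cases hi : i < p.length
    · have hdrop : p.drop i = p[i] :: p.drop (i + 1) := List.drop_eq_getElem_cons hi
      by_cases hM : p[i] = 'M'
      · have hkle : i ≤ p.length := le_of_lt hi
        have hff := PySem.Chars.findFrom_natCast p ['*'] i hkle
        have hMstar : p[i] ≠ '*' := by rw [hM]; decide
        have htw : (p.drop i).takeWhile (fun x => x ≠ '*')
            = p[i] :: (p.drop (i + 1)).takeWhile (fun x => x ≠ '*') := by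
          rw [hdrop, List.takeWhile_cons, if_pos (by simp [hMstar])]
        have hrhs : scanS (p.drop i) st =
            scanS (((p.drop (i + 1)).dropWhile (fun x => x ≠ '*')).drop 1)
              (flushS st ((p.drop i).takeWhile (fun x => x ≠ '*'))) := by
          conv_lhs => rw [hdrop, hM]
          rw [scanS_cons_M, htw, hM]
        by_cases hstar : '*' ∈ p.drop i
        · -- stop codon found at i + idx
          set idx := ((p.drop i).takeWhile (fun x => x ≠ '*')).length with hidxdef
          have hfd : PySem.Chars.find (p.drop i) ['*'] = (idx : Int) :=
            find_single_eq_of_mem '*' _ hstar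
          have hji : PySem.Chars.findFrom p ['*'] (i : Int) none = (i : Int) + (idx : Int) := by
            rw [hff, hfd]
            simp
          simp only [scanALoop, dif_pos hi, if_pos hM, hji]
          have hjne : ((i : Int) + (idx : Int)) ≠ -1 := by omega
          simp only [if_pos hjne, PySem.Chars.slice_eq_listSlice,
            PySem.List.slice_natCast_add]
          have horl : ((i : Int) + (idx : Int)) - (i : Int) = (idx : Int) := by omega
          have htake : (p.drop i).take idx = (p.drop i).takeWhile (fun x => x ≠ '*') :=
            take_len_takeWhile _ _
          have hiN : ((i : Int) + (idx : Int) + 1).toNat = i + idx + 1 := by omega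
          rw [horl, htake, hiN]
          rw [ih p (i + idx + 1) _ (by omega)]
          rw [hrhs]
          have hdw : p.drop (i + idx + 1) = ((p.drop (i + 1)).dropWhile (fun x => x ≠ '*')).drop 1 := by
            have e1 : p.drop (i + idx + 1) = ((p.drop i).drop idx).drop 1 := by
              rw [List.drop_drop, List.drop_drop, show i + (idx + 1) = i + idx + 1 by omega]
            have e2 : (p.drop i).drop idx = (p.drop i).dropWhile (fun x => x ≠ '*') :=
              (dropWhile_eq_drop_len_takeWhile _ _).symm
            have e3 : (p.drop i).dropWhile (fun x => x ≠ '*')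
                = (p.drop (i + 1)).dropWhile (fun x => x ≠ '*') := by
              rw [hdrop, List.dropWhile_cons, if_pos (by simp [hMstar])]
            rw [e1, e2, e3]
          rw [hdw]
          unfold flushS
          rw [← hidxdef]
        · -- no stop codon: ORF runs to the end of the protein
          have hfd : PySem.Chars.find (p.drop i) ['*'] = -1 :=
            find_single_eq_neg_one '*' _ hstar
          have hji : PySem.Chars.findFrom p ['*'] (i : Int) none = -1 := by
            rw [hff, hfd]; simp
          simp only [scanALoop, dif_pos hi, if_pos hM, hji]
          simp only [ne_eq, not_true_eq_false, if_false, PySem.Chars.slice_eq_listSlice]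
          have hsl : PySem.List.slice p (some (i : Int)) (some (p.length : Int)) = p.drop i := by
            rw [PySem.List.slice_natCast]
            have : (p.drop i).length = p.length - i := List.length_drop ..
            rw [← this, List.take_length]
          rw [hsl]
          have hlNat : ((p.length : Int)).toNat = p.length := by omega
          rw [hlNat]
          rw [ih p p.length _ (by omega), List.drop_length, scanS_nil]
          rw [hrhs]
          have hnomem : ∀ x ∈ p.drop (i + 1), (fun y => y ≠ '*') x = true := by
            intro x hx
            have : x ≠ '*' := by
              intro hxe
              subst hxe
              exact hstar (by rw [hdrop]; exact List.mem_cons_of_mem _ hx)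
            simp [this]
          have hdwnil : (p.drop (i + 1)).dropWhile (fun x => x ≠ '*') = [] :=
            List.dropWhile_eq_nil_iff.mpr (by intro x hx; simpa using hnomem x hx)
          rw [hdwnil]
          simp only [List.drop_nil, scanS_nil]
          have htwfull : (p.drop i).takeWhile (fun x => x ≠ '*') = p.drop i :=
            List.takeWhile_eq_self_iff.mpr (by
              intro x hx
              have : x ≠ '*' := by
                intro hxe
                subst hxe
                exact hstar hx
              simp [this])
          rw [htwfull]
          unfold flushS
          have hlen2 : ((p.drop i).length : Int) = (p.length : Int) - (i : Int) := by
            rw [List.length_drop]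
            omega
          rw [hlen2]
      · simp only [scanALoop, dif_pos hi, if_neg hM]
        rw [ih p (i + 1) st (by omega), hdrop, scanS_cons_ne _ _ _ hM]
    · have hd : p.drop i = [] := List.drop_eq_nil_iff.mpr (by omega)
      simp [scanALoop, hi, hd, scanS]

-- B's fold step, named for the proofs below
def stepB (acc : (List Char × Int) × List Char) (ch : Char) : (List Char × Int) × List Char :=
  let st := acc.1
  let run := acc.2
  if ch = '*' then
    (if run ≠ [] ∧ (run.length : Int) > st.2 then (run, (run.length : Int)) else st, [])
  else if run ≠ [] then (st, run ++ [ch])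
  else if ch = 'M' then (st, [ch])
  else acc

def finB (r : (List Char × Int) × List Char) : List Char × Int :=
  if r.2 ≠ [] ∧ (r.2.length : Int) > r.1.2 then (r.2, (r.2.length : Int)) else r.1

lemma scanB_eq_finB (p : List Char) (st : List Char × Int) :
    scanB p st = finB (p.foldl stepB (st, [])) := rfl

-- joint invariant for B's streaming fold, by strong induction on the protein length
lemma foldB_invariant (n : Nat) :
    ∀ (cs : List Char), cs.length ≤ n →
      (∀ st : List Char × Int, finB (cs.foldl stepB (st, [])) = scanS cs st) ∧
      (∀ (st : List Char × Int) (r : List Char), r ≠ [] →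
        finB (cs.foldl stepB (st, r)) =
          scanS ((cs.dropWhile (fun x => x ≠ '*')).drop 1)
            (flushS st (r ++ cs.takeWhile (fun x => x ≠ '*')))) := by
  induction n with
  | zero =>
    intro cs hcs
    have : cs = [] := List.eq_nil_of_length_eq_zero (by omega)
    subst this
    constructor
    · intro st; simp [finB, scanS]
    · intro st r hr
      simp only [List.foldl_nil, List.takeWhile_nil, List.dropWhile_nil, List.drop_nil,
        List.append_nil, scanS, finB, flushS]
      simp [hr]
  | succ n ih =>
    intro cs hcs
    match cs with
    | [] =>
      constructor
      · intro st; simp [finB, scanS]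
      · intro st r hr
        simp only [List.foldl_nil, List.takeWhile_nil, List.dropWhile_nil, List.drop_nil,
          List.append_nil, scanS, finB, flushS]
        simp [hr]
    | c :: cs' =>
      have hlen : cs'.length ≤ n := by simpa using hcs
      constructor
      · -- empty run
        intro st
        by_cases hstar : c = '*'
        · subst hstar
          have hstep : stepB (st, []) '*' = (st, []) := by simp [stepB]
          rw [List.foldl_cons, hstep, (ih cs' hlen).1 st]
          rw [scanS]
          simp
        · by_cases hMc : c = 'M'
          · subst hMc
            have hstep : stepB (st, []) 'M' = (st, ['M']) := by simp [stepB]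
            rw [List.foldl_cons, hstep, (ih cs' hlen).2 st ['M'] (by simp)]
            rw [scanS, if_pos rfl]
            rfl
          · have hstep : stepB (st, []) c = (st, []) := by simp [stepB, hstar, hMc]
            rw [List.foldl_cons, hstep, (ih cs' hlen).1 st]
            rw [scanS, if_neg hMc]
      · -- nonempty run
        intro st r hr
        by_cases hstar : c = '*'
        · subst hstar
          have hstep : stepB (st, r) '*' = (flushS st r, []) := by
            simp only [stepB, flushS]
            simp [hr]
          rw [List.foldl_cons, hstep, (ih cs' hlen).1 (flushS st r)]
          rw [List.takeWhile_cons]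
          simp only [ne_eq, not_true_eq_false, decide_false, Bool.false_eq_true, if_false,
            List.append_nil]
          rw [List.dropWhile_cons]
          simp
        · have hstep : stepB (st, r) c = (st, r ++ [c]) := by
            simp [stepB, hstar, hr]
          rw [List.foldl_cons, hstep, (ih cs' hlen).2 st (r ++ [c]) (by simp)]
          rw [List.takeWhile_cons, List.dropWhile_cons]
          have hcs : decide (c ≠ '*') = true := by simp [hstar]
          rw [if_pos hcs, if_pos hcs]
          rw [List.append_assoc]
          simp

lemma scanB_eq_scanS (p : List Char) (st : List Char × Int) :
    scanB p st = scanS p st := by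
  rw [scanB_eq_finB]
  exact (foldB_invariant p.length p (le_refl _)).1 st

lemma scanALoop_full (p : List Char) (st : List Char × Int) :
    scanALoop p p.length 0 st = scanB p st := by
  rw [scanALoop_eq_scanS p.length p 0 st (by omega), List.drop_zero, scanB_eq_scanS]

-- one frame of A equals one frame of B
lemma frameA_eq (ss : List Char) (i : Int) (hi : 0 ≤ i) (st : List Char × Int) :
    (let protein := translateDnaChars (PySem.Chars.slice ss (some i) none)
     scanALoop protein protein.length 0 st) = scanB (translateB (ss.drop i.toNat)) st := by
  simp only [PySem.Chars.slice_eq_listSlice, PySem.List.slice_from ss hi,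
    scanALoop_full, translateA_eq]

-- ===== VERDICT (by name: the statement is the Claim_ definition above) =====
theorem longest_orf_in_circular_spec : Claim_equal_longest_orf_in_circular := by
  intro seq min_aa _
  unfold Spec_longest_orf_in_circular longest_orf_in_circular longest_orf_in_circular_alt
  have hpr : PySem.List.pyRange 0 3 1 = [0, 1, 2] := by decide
  simp only [hpr, List.foldl_cons, List.foldl_nil, List.flatMap_cons, List.flatMap_nil,
    List.map_cons, List.map_nil, List.append_nil, List.cons_append, List.nil_append,
    revcomp_eq]
  rw [frameA_eq _ 0 (by norm_num), frameA_eq _ 1 (by norm_num), frameA_eq _ 2 (by norm_num),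
    frameA_eq _ 0 (by norm_num), frameA_eq _ 1 (by norm_num), frameA_eq _ 2 (by norm_num)]
  rfl
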